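-- pv_equiv track=rewrite | github.com/jason4185/genlayer-tools | genlayer_key_vault/contract.py | is_valid_address
-- ===== SOURCE A (Python) =====
-- def is_valid_address(address: str) -> bool:
--     if not address:
--         return False
--     if not address.startswith("0x"):
--         return False
--     if len(address) != 42:
--         return False
--     valid_chars = "0123456789abcdefABCDEF"
--     for char in address[2:]:
--         if char not in valid_chars:
--             return False
--     return True
-- ===== SOURCE B (Python) =====
-- def _hex(c):
--     o = ord(c)
--     return 48 <= o <= 57 or 65 <= o <= 70 or 97 <= o <= 102
--
--
-- def is_valid_address(address: str) -> bool:
--     # Single-pass finite automaton for the pattern 0x[0-9a-fA-F]{40}: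
--     # state = number of pattern characters matched so far, -1 = dead state.
--     state = 0
--     for c in address:
--         if state == 0:
--             state = 1 if c == "0" else -1
--         elif state == 1:
--             state = 2 if c == "x" else -1
--         elif 2 <= state <= 41:
--             state = state + 1 if _hex(c) else -1
--         else:
--             state = -1
--     return state == 42
-- ===== Notes on version B (the rewrite author's own statement) =====
-- stated objective: alternative
-- what changed: Replaces A's staged guards (emptiness, prefix, length 42, then a per-character membership loop over a 22-char alphabet string) with a single left-to-right deterministic finite automaton run for the pattern 0x[0-9a-fA-F]{40}: one pass, a matched-count state with a dead state, no length check, no prefix test, no slicing.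
import Mathlib
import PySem

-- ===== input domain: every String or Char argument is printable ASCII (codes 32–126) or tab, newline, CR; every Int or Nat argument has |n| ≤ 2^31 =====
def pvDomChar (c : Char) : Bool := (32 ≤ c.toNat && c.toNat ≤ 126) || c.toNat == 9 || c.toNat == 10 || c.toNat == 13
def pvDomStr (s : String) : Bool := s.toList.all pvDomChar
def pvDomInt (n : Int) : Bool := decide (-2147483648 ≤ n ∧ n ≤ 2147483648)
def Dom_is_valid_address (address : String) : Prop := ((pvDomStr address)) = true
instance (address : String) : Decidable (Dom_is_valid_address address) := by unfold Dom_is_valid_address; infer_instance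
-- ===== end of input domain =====

-- B replaces A's staged guards (emptiness, prefix, length, per-char membership loop)
-- by a single-pass finite-automaton run for the pattern 0x[0-9a-fA-F]{40} (alternative).

-- ===== PORT A =====
-- the loop 'for char in address[2:]: if char not in valid_chars: return False'
def isvaLoopA (validChars : List Char) : List Char → Bool
  | [] => true
  | c :: rest => if !(validChars.contains c) then false else isvaLoopA validChars rest

def is_valid_address (address : String) : Bool :=
  if PySem.Str.len address == 0 then false
  else if !(PySem.Str.startswith address "0x") then false
  else if !(PySem.Str.len address == 42) then false
  else
    let valid_chars : List Char := "0123456789abcdefABCDEF".toList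
    isvaLoopA valid_chars (PySem.Str.slice address (some 2) none).toList

-- ===== PORT B =====
def isvaHex (c : Char) : Bool :=
  let o := c.toNat
  (48 ≤ o && o ≤ 57) || (65 ≤ o && o ≤ 70) || (97 ≤ o && o ≤ 102)

-- one DFA transition: state = number of pattern characters matched, -1 = dead
def isvaStep (s : Int) (c : Char) : Int :=
  if s == 0 then (if c == '0' then 1 else -1)
  else if s == 1 then (if c == 'x' then 2 else -1)
  else if 2 ≤ s && s ≤ 41 then (if isvaHex c then s + 1 else -1)
  else -1

def is_valid_address_alt (address : String) : Bool :=
  address.toList.foldl isvaStep 0 == 42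

-- ===== PRECONDITION & SPEC =====
def Spec_is_valid_address (address : String) (out : Bool) : Prop := out = is_valid_address_alt address
instance (address : String) (out : Bool) : Decidable (Spec_is_valid_address address out) := by unfold Spec_is_valid_address; infer_instance

-- ===== CLAIM (what is proved, stated in full; the proofs are below) =====
def Claim_equal_is_valid_address : Prop := ∀ (address : String), Dom_is_valid_address address → Spec_is_valid_address address (is_valid_address address)

-- ===== LEMMAS AND PROOFS =====

-- Char equality reduces to code-point equality
lemma isva_char_eq_iff (a b : Char) : a = b ↔ a.toNat = b.toNat :=
  ⟨fun h => congrArg _ h, fun h => Char.ext (UInt32.toNat_inj.mp h)⟩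

-- membership in A's valid_chars string = B's hex test
lemma isva_mem_hex (c : Char) :
    (("0123456789abcdefABCDEF".toList).contains c) = isvaHex c := by
  rw [Bool.eq_iff_iff]
  simp [isvaHex, isva_char_eq_iff]
  omega

-- A's character loop is the all-hex test
lemma isva_loop_eq_all (l : List Char) :
    isvaLoopA ("0123456789abcdefABCDEF".toList) l = l.all isvaHex := by
  induction l with
  | nil => rfl
  | cons c rest ih =>
    rw [isvaLoopA, List.all_cons, isva_mem_hex c, ih]
    cases isvaHex c <;> simp

-- the dead state absorbs
lemma isva_dead (l : List Char) : l.foldl isvaStep (-1) = -1 := by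
  induction l with
  | nil => rfl
  | cons c rest ih => simpa [isvaStep] using ih

-- from any state 2 ≤ s ≤ 42, the DFA accepts iff the rest is hex and fills the count
lemma isva_run_mid (l : List Char) : ∀ s : Int, 2 ≤ s → s ≤ 42 →
    (l.foldl isvaStep s == 42) = (l.all isvaHex && (s + l.length == 42)) := by
  induction l with
  | nil =>
    intro s h2 h42
    simp only [List.foldl_nil, List.all_nil, List.length_nil, Bool.true_and]
    norm_num
  | cons c rest ih =>
    intro s h2 h42
    simp only [List.foldl_cons, List.all_cons, List.length_cons]
    by_cases hs : s ≤ 41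
    · have h0 : (s == 0) = false := by simp; omega
      have h1 : (s == 1) = false := by simp; omega
      have hm : (decide (2 ≤ s) && decide (s ≤ 41)) = true := by simp; omega
      have hstep : isvaStep s c = if isvaHex c then s + 1 else -1 := by
        simp [isvaStep, h0, h1, hm]
      rw [hstep]
      cases hhex : isvaHex c
      · rw [if_neg (by simp), isva_dead]
        simp
      · rw [if_pos (by rfl), ih (s + 1) (by omega) (by omega)]
        simp only [Bool.true_and]
        congr 1
        rw [Bool.eq_iff_iff]
        simp only [beq_iff_eq]
        push_cast
        constructor <;> intro <;> omega
    · have hstep : isvaStep s c = -1 := by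
        have h0 : (s == 0) = false := by simp; omega
        have h1 : (s == 1) = false := by simp; omega
        have hm : (decide (2 ≤ s) && decide (s ≤ 41)) = false := by simp; omega
        simp [isvaStep, h0, h1, hm]
      rw [hstep, isva_dead, Bool.eq_iff_iff]
      simp only [beq_iff_eq, Bool.and_eq_true]
      push_cast
      constructor
      · intro h; exact absurd h (by norm_num)
      · rintro ⟨-, h⟩; omega

-- ===== VERDICT (by name: the statement is the Claim_ definition above) =====
theorem is_valid_address_spec : Claim_equal_is_valid_address := by
  intro address _
  unfold Spec_is_valid_address is_valid_address is_valid_address_alt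
  rcases h : address.toList with _ | ⟨a, tl⟩
  · simp [PySem.Str.len, h]
  · rcases tl with _ | ⟨b, tl2⟩
    · -- one character: A fails the startswith guard; B's run ends at state ≤ 1
      simp only [PySem.Str.len_eq, PySem.Str.startswith_eq, h, List.foldl_cons, List.foldl_nil,
        PySem.Chars.startswith]
      rw [show isvaStep 0 a = if a == '0' then 1 else -1 from rfl]
      have : ((if a == '0' then (1:Int) else -1) == 42) = false := by
        split <;> rfl
      rw [this]
      simp [List.isPrefixOf]
    · -- at least two characters
      simp only [PySem.Str.len_eq, PySem.Str.startswith_eq, PySem.Str.toList_slice, h,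
        PySem.Chars.startswith, PySem.Chars.slice_eq_listSlice, List.foldl_cons]
      rw [PySem.List.slice_from (xs := a :: b :: tl2) (a := 2) (by norm_num)]
      rw [show (a :: b :: tl2).drop (2:Int).toNat = tl2 from rfl, isva_loop_eq_all]
      rw [show isvaStep 0 a = if a == '0' then 1 else -1 from rfl]
      by_cases ha : a = '0'
      · rw [if_pos (beq_iff_eq.mpr ha)]
        rw [show isvaStep 1 b = if b == 'x' then 2 else -1 from rfl]
        by_cases hb : b = 'x'
        · subst ha; subst hb
          rw [if_pos (beq_iff_eq.mpr rfl),
            isva_run_mid tl2 2 (by norm_num) (by norm_num),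
            show ("0x".toList.isPrefixOf ('0' :: 'x' :: tl2)) = true from rfl]
          simp only [List.length_cons, Bool.not_true, Bool.false_eq_true, if_false]
          by_cases hlen : tl2.length = 40
          · simp [hlen]
          · have h42 : ¬ ((tl2.length : Int) + 1 + 1 = 42) := by omega
            have h2 : ¬ ((2 : Int) + (tl2.length : Int) = 42) := by omega
            simp [h42, h2]
        · simp [List.isPrefixOf, hb, isva_dead]
          intro _ _ hx
          exact absurd hx.symm hb
      · simp [List.isPrefixOf, ha, isvaStep, isva_dead]
        intro _ h0
        exact absurd h0.symm ha
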